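-- pv_equiv track=rewrite | github.com/NimaDT/AoC2024 | 02/02b.py | increaser
-- ===== SOURCE A (Python) =====
-- def increaser(input):
--     statement = all(earlier < later for earlier, later in zip(input, input[1:]))
--     if statement == True:
--         for level in range(len(input) - 1):
--             if input[level + 1] - input[level] > 3:
--                 return False
--             else:
--                 continue
--         return True
--     else:
--         return False
-- ===== SOURCE B (Python) =====
-- def increaser(input):
--     for a, b in zip(input, input[1:]):
--         if not (0 < b - a <= 3):
--             return False
--     return True
-- ===== Notes on version B (the rewrite author's own statement) =====
-- stated objective: simpler
-- what changed: A's two sequential scans (an all() over adjacent pairs for strict increase, then an index loop over range(len-1) for the gap bound) are merged into one pass over zip(input, input[1:]) that early-returns False on the first pair violating 0 < b - a <= 3.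
import Mathlib
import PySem

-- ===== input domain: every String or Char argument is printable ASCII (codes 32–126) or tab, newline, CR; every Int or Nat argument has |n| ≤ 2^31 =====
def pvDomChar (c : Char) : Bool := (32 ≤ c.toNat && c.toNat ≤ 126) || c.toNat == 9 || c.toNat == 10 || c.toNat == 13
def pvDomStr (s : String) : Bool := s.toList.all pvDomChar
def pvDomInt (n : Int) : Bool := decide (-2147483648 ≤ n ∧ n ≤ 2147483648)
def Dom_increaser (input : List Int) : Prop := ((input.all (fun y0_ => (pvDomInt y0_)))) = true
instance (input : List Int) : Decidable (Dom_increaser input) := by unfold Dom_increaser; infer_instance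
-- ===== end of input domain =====

-- B merges A's two scans (strict-increase all() + gap index loop) into one early-return pass over adjacent pairs.

-- ===== PORT A =====
-- the for-loop over range(len(input)-1): early return False on a gap > 3, True after the loop
def increaserGapLoop (input : List Int) : List Int → Bool
  | [] => true
  | level :: rest =>
    if PySem.List.pyGetD input (level + 1) 0 - PySem.List.pyGetD input level 0 > 3 then false
    else increaserGapLoop input rest

def increaser (input : List Int) : Bool :=
  let statement := (input.zip (input.drop 1)).all (fun p => decide (p.1 < p.2))
  if statement = true then
    increaserGapLoop input (PySem.List.pyRange 0 ((input.length : Int) - 1) 1)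
  else false

-- ===== PORT B =====
-- single pass: early return False on the first adjacent pair with not (0 < b - a <= 3)
def increaserAltLoop : List (Int × Int) → Bool
  | [] => true
  | (a, b) :: rest =>
    if !(decide (0 < b - a ∧ b - a ≤ 3)) then false
    else increaserAltLoop rest

def increaser_alt (input : List Int) : Bool :=
  increaserAltLoop (input.zip (input.drop 1))

-- ===== PRECONDITION & SPEC =====
def Spec_increaser (input : List Int) (out : Bool) : Prop := out = increaser_alt input
instance (input : List Int) (out : Bool) : Decidable (Spec_increaser input out) := by unfold Spec_increaser; infer_instance

-- ===== CLAIM (what is proved, stated in full; the proofs are below) =====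
def Claim_equal_increaser : Prop := ∀ (input : List Int), Dom_increaser input → Spec_increaser input (increaser input)

-- ===== LEMMAS AND PROOFS =====

-- both early-return loops are List.all in disguise
lemma increaserAltLoop_eq_all (l : List (Int × Int)) :
    increaserAltLoop l = l.all (fun p => decide (0 < p.2 - p.1 ∧ p.2 - p.1 ≤ 3)) := by
  induction l with
  | nil => rfl
  | cons p rest ih =>
    obtain ⟨a, b⟩ := p
    by_cases h : 0 < b - a ∧ b - a ≤ 3
    · simp [increaserAltLoop, ih, show a < b by omega, show b ≤ 3 + a by omega]
    · rcases (show b ≤ a ∨ 3 + a < b by omega) with h' | h'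
      · simp [increaserAltLoop, show ¬ a < b by omega]
      · simp [increaserAltLoop, show ¬ b ≤ 3 + a by omega]

lemma increaserGapLoop_eq_all (input : List Int) (l : List Int) :
    increaserGapLoop input l
      = l.all (fun level => decide ¬(PySem.List.pyGetD input (level + 1) 0 - PySem.List.pyGetD input level 0 > 3)) := by
  induction l with
  | nil => rfl
  | cons level rest ih =>
    by_cases h : PySem.List.pyGetD input (level + 1) 0 - PySem.List.pyGetD input level 0 > 3
    · simp only [increaserGapLoop, if_pos h, ih, List.all_cons]
      rw [show (decide ¬PySem.List.pyGetD input (level + 1) 0 - PySem.List.pyGetD input level 0 > 3) = false by simp; omega]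
      simp
    · simp only [increaserGapLoop, if_neg h, ih, List.all_cons]
      symm
      rw [show (decide ¬PySem.List.pyGetD input (level + 1) 0 - PySem.List.pyGetD input level 0 > 3) = true by simp; omega]
      simp

-- the zip-of-adjacent-pairs all ↔ an indexwise condition
lemma zip_adj_all_iff (input : List Int) (p : Int × Int → Bool) :
    (input.zip (input.drop 1)).all p = true
      ↔ ∀ i : Nat, i + 1 < input.length → p (input[i]!, input[i+1]!) = true := by
  rw [List.all_eq_true]
  constructor
  · intro hall i h
    have := hall ((input.zip (input.drop 1))[i]'(by simp; omega)) (List.getElem_mem _)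
    have he : (input.zip (input.drop 1))[i]'(by simp; omega) = (input[i], input[i+1]) := by simp
    rw [he] at this
    rwa [getElem!_pos input i (by omega), getElem!_pos input (i+1) (by omega)]
  · intro h x hx
    rw [List.mem_iff_getElem] at hx
    obtain ⟨i, hi, hix⟩ := hx
    have hi' : i + 1 < input.length := by simp at hi; omega
    have he : x = (input[i], input[i+1]) := by rw [← hix]; simp
    have := h i hi'
    rwa [getElem!_pos input i (by omega), getElem!_pos input (i+1) (by omega), ← he] at this

-- the index-range all ↔ the same indexwise condition on gaps
lemma gap_range_all_iff (input : List Int) :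
    (PySem.List.pyRange 0 ((input.length : Int) - 1) 1).all
        (fun level => decide ¬(PySem.List.pyGetD input (level + 1) 0 - PySem.List.pyGetD input level 0 > 3)) = true
      ↔ ∀ i : Nat, i + 1 < input.length → input[i+1]! - input[i]! ≤ 3 := by
  rw [List.all_eq_true]
  have key : ∀ i : Nat, i + 1 < input.length →
      (PySem.List.pyGetD input ((i : Int) + 1) 0 = input[i+1]! ∧ PySem.List.pyGetD input (i : Int) 0 = input[i]!) := by
    intro i hi
    constructor
    · have hc : ((i : Int) + 1) = ((i + 1 : Nat) : Int) := by push_cast; ring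
      rw [hc, PySem.List.pyGetD_natCast, List.getD_eq_getElem _ _ (by omega), getElem!_pos input (i+1) (by omega)]
    · rw [PySem.List.pyGetD_natCast, List.getD_eq_getElem _ _ (by omega), getElem!_pos input i (by omega)]
  constructor
  · intro h i hi
    have hmem : (i : Int) ∈ PySem.List.pyRange 0 ((input.length : Int) - 1) 1 := by
      rw [PySem.List.mem_pyRange_one]; omega
    have := h _ hmem
    obtain ⟨h1, h2⟩ := key i hi
    simp only [decide_eq_true_eq, not_lt, h1, h2] at this
    omega
  · intro h x hx
    rw [PySem.List.mem_pyRange_one] at hx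
    obtain ⟨i, rfl⟩ : ∃ i : Nat, x = (i : Int) := ⟨x.toNat, by omega⟩
    have hi : i + 1 < input.length := by omega
    obtain ⟨h1, h2⟩ := key i hi
    have := h i hi
    simp only [decide_eq_true_eq, not_lt, h1, h2]
    omega

-- ===== VERDICT (by name: the statement is the Claim_ definition above) =====
theorem increaser_spec : Claim_equal_increaser := by
  intro input _
  unfold Spec_increaser increaser increaser_alt
  rw [increaserAltLoop_eq_all, increaserGapLoop_eq_all]
  by_cases hst : (input.zip (input.drop 1)).all (fun p => decide (p.1 < p.2)) = true
  · simp only [hst, if_pos]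
    rw [Bool.eq_iff_iff, gap_range_all_iff, zip_adj_all_iff]
    have hlt := (zip_adj_all_iff input _).mp hst
    constructor
    · intro h i hi
      have := hlt i hi
      have := h i hi
      simp only [decide_eq_true_eq] at *
      omega
    · intro h i hi
      have := h i hi
      simp only [decide_eq_true_eq] at this
      omega
  · simp only [hst, if_false, Bool.false_eq_true]
    symm
    rw [← Bool.not_eq_true]
    intro hc
    apply hst
    rw [zip_adj_all_iff] at hc ⊢
    intro i hi
    have := hc i hi
    simp only [decide_eq_true_eq] at *
    omega
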